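-- pv_equiv track=rewrite | github.com/1shashank-supreme/Shashank.Puppala | Task2.py | sorting_employees
-- ===== SOURCE A (Python) =====
-- def sorting_employees(employees_list):
--     company_leads={ }
--     number_of_employees={ }
--     for y in employees_list:
--         company=y[y.index('@')+1:y.index('.')]
--         name=y[0:y.index('@')]
--         if(company not in company_leads):
--             company_leads[company]=[ ]
--             company_leads[company].append(name)
--             number_of_employees[company]=1
--         else:
--             company_leads[company].append(name)
--             number_of_employees[company]+=1
--     return company_leads, number_of_employees
-- ===== SOURCE B (Python) =====
-- def sorting_employees(employees_list):
--     # Stage 1: parse every email once into (company, name) pairs.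
--     pairs = [(y[y.index('@') + 1:y.index('.')], y[0:y.index('@')]) for y in employees_list]
--     # Stage 2: first-occurrence order of companies.
--     companies = []
--     for c, _ in pairs:
--         if c not in companies:
--             companies.append(c)
--     # Stage 3: group and count by filtering the parsed pairs per company.
--     company_leads = {c: [n for cc, n in pairs if cc == c] for c in companies}
--     number_of_employees = {c: len(v) for c, v in company_leads.items()}
--     return company_leads, number_of_employees
-- ===== Notes on version B (the rewrite author's own statement) =====
-- stated objective: alternative
-- what changed: B is staged: it first parses every email into a (company, name) pair, then dedups the companies in first-occurrence order, then builds each group and count by filtering the parsed pairs per company, instead of A's single pass mutating two dicts in lock-step.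
import Mathlib
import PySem

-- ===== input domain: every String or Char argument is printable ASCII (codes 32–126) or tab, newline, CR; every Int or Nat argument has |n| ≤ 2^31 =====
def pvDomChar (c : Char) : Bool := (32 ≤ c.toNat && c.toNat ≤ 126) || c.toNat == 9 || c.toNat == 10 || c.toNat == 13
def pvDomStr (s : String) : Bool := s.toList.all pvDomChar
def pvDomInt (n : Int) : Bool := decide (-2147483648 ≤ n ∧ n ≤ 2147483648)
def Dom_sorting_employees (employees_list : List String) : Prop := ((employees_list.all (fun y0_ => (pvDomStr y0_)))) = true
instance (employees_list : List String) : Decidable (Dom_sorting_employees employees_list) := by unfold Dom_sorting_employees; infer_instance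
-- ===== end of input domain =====

-- B replaces A's single pass with incremental dicts by three staged passes: parse all emails into
-- (company, name) pairs, dedup the companies in first-occurrence order, then group/count by
-- filtering the pairs per company (objective: alternative — same result, no dict mutation in a loop).

-- ===== PORT A =====
def sorting_employees (employees_list : List String) : (List (String × List String)) × (List (String × Int)) :=
  -- company_leads={}, number_of_employees={}; for y in employees_list: …
  let st := employees_list.foldl
    (fun (acc : PySem.Dict String (List String) × PySem.Dict String Int) y =>
      let company := PySem.Str.slice y (some (PySem.Str.find y "@" + 1)) (some (PySem.Str.find y "."))
      let name := PySem.Str.slice y (some 0) (some (PySem.Str.find y "@"))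
      if acc.1.contains company = false then
        (acc.1.insert company [name], acc.2.insert company 1)
      else
        (acc.1.modify company [] (fun l => l ++ [name]), acc.2.modify company 0 (· + 1)))
    (PySem.Dict.empty, PySem.Dict.empty)
  (st.1.items, st.2.items)

-- ===== PORT B =====
def sorting_employees_alt (employees_list : List String) : (List (String × List String)) × (List (String × Int)) :=
  -- pairs = [(y[y.index('@')+1:y.index('.')], y[0:y.index('@')]) for y in employees_list]
  let pairs := employees_list.map (fun y =>
    (PySem.Str.slice y (some (PySem.Str.find y "@" + 1)) (some (PySem.Str.find y ".")),
     PySem.Str.slice y (some 0) (some (PySem.Str.find y "@"))))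
  -- companies = []; for c,_ in pairs: if c not in companies: companies.append(c)
  let companies := pairs.foldl
    (fun (acc : List String) p => if acc.contains p.1 then acc else acc ++ [p.1]) []
  -- company_leads = {c: [n for cc,n in pairs if cc==c] for c in companies}
  -- (keys 'companies' are distinct by construction, so the dict's items are exactly this map)
  let company_leads := companies.map (fun c => (c, (pairs.filter (fun p => p.1 == c)).map (·.2)))
  -- number_of_employees = {c: len(v) for c,v in company_leads.items()}
  (company_leads, company_leads.map (fun kv => (kv.1, (kv.2.length : Int))))

-- ===== PRECONDITION & SPEC =====
-- Pre_ excludes exactly the strings on which Python's y.index raises ValueError: every email must contain '@' and '.'.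
def Pre_sorting_employees (employees_list : List String) : Prop :=
  ∀ y ∈ employees_list, PySem.Str.isIn "@" y = true ∧ PySem.Str.isIn "." y = true
instance (employees_list : List String) : Decidable (Pre_sorting_employees employees_list) := by unfold Pre_sorting_employees; infer_instance

def pvWitness_sorting_employees : List String := ["alice@acme.com", "bob@acme.com", "carol@zeta.org"]

def Spec_sorting_employees (employees_list : List String) (out : (List (String × List String)) × (List (String × Int))) : Prop := out = sorting_employees_alt employees_list
instance (employees_list : List String) (out : (List (String × List String)) × (List (String × Int))) : Decidable (Spec_sorting_employees employees_list out) := by unfold Spec_sorting_employees; infer_instance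

-- ===== CLAIM (what is proved, stated in full; the proofs are below) =====
def Claim_equal_sorting_employees : Prop := ∀ (employees_list : List String), Dom_sorting_employees employees_list → Pre_sorting_employees employees_list → Spec_sorting_employees employees_list (sorting_employees employees_list)

-- ===== LEMMAS AND PROOFS =====

def pvParse (y : String) : String × String :=
  (PySem.Str.slice y (some (PySem.Str.find y "@" + 1)) (some (PySem.Str.find y "."))
  , PySem.Str.slice y (some 0) (some (PySem.Str.find y "@")))

def pvStepA (acc : PySem.Dict String (List String) × PySem.Dict String Int) (y : String) :
    PySem.Dict String (List String) × PySem.Dict String Int :=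
  let company := PySem.Str.slice y (some (PySem.Str.find y "@" + 1)) (some (PySem.Str.find y "."))
  let name := PySem.Str.slice y (some 0) (some (PySem.Str.find y "@"))
  if acc.1.contains company = false then
    (acc.1.insert company [name], acc.2.insert company 1)
  else
    (acc.1.modify company [] (fun l => l ++ [name]), acc.2.modify company 0 (· + 1))

-- an insert of a fresh key is a modify
theorem pvInsertFreshList (d : PySem.Dict String (List String)) (k : String) (nm : String)
    (h : d.contains k = false) : d.insert k [nm] = d.modify k [] (fun l => l ++ [nm]) := by
  simp [PySem.Dict.modify, PySem.Dict.getD_of_not_contains _ _ h]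

theorem pvInsertFreshInt (d : PySem.Dict String Int) (k : String)
    (h : d.contains k = false) : d.insert k 1 = d.modify k 0 (· + 1) := by
  simp [PySem.Dict.modify, PySem.Dict.getD_of_not_contains _ _ h]

-- A's fold is, component-wise, a pure modify-append fold and a modify-count fold over the parsed pairs
theorem pvFoldA (l : List String) (d1 : PySem.Dict String (List String)) (d2 : PySem.Dict String Int)
    (hk : d2.keys = d1.keys) :
    l.foldl pvStepA (d1, d2)
      = ((l.map pvParse).foldl (fun d p => d.modify p.1 [] (fun v => v ++ [p.2])) d1,
         (l.map pvParse).foldl (fun d p => d.modify p.1 0 (· + 1)) d2) := by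
  induction l generalizing d1 d2 with
  | nil => rfl
  | cons y t ih =>
    simp only [List.foldl_cons, List.map_cons]
    have hcc : d2.contains (pvParse y).1 = d1.contains (pvParse y).1 := by
      rw [PySem.Dict.contains_eq_decide_mem_keys, PySem.Dict.contains_eq_decide_mem_keys, hk]
    have hkeys : (d2.modify (pvParse y).1 0 (· + 1)).keys
        = (d1.modify (pvParse y).1 [] (fun v => v ++ [(pvParse y).2])).keys := by
      rw [PySem.Dict.keys_modify, PySem.Dict.keys_modify]
      by_cases hc : d1.contains (pvParse y).1 = true
      · rw [PySem.Dict.keys_insert_of_contains _ _ (hcc.trans hc),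
            PySem.Dict.keys_insert_of_contains _ _ hc, hk]
      · have hc1 : d1.contains (pvParse y).1 = false := by simpa using hc
        rw [PySem.Dict.keys_insert_of_not_contains _ _ (hcc.trans hc1),
            PySem.Dict.keys_insert_of_not_contains _ _ hc1, hk]
    have hstep : pvStepA (d1, d2) y
        = (d1.modify (pvParse y).1 [] (fun v => v ++ [(pvParse y).2]),
           d2.modify (pvParse y).1 0 (· + 1)) := by
      show (if d1.contains (pvParse y).1 = false then
              (d1.insert (pvParse y).1 [(pvParse y).2], d2.insert (pvParse y).1 1)
            else
              (d1.modify (pvParse y).1 [] (fun v => v ++ [(pvParse y).2]),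
               d2.modify (pvParse y).1 0 (· + 1))) = _
      by_cases hc : d1.contains (pvParse y).1 = false
      · rw [if_pos hc, pvInsertFreshList _ _ _ hc, pvInsertFreshInt _ _ (hcc.trans hc)]
      · rw [if_neg hc]
    rw [hstep]
    exact ih _ _ hkeys

theorem pvItemsApp (P : List (String × String)) :
    (P.foldl (fun d p => d.modify p.1 [] (fun v => v ++ [p.2])) PySem.Dict.empty).items
      = (PySem.Set.ofList (P.map Prod.fst)).map
          (fun c => (c, (P.filter (fun p => p.1 == c)).map (·.2))) := by
  have hk : (P.foldl (fun d p => d.modify p.1 [] (fun v => v ++ [p.2])) PySem.Dict.empty).keys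
      = PySem.Set.ofList (P.map Prod.fst) := by
    rw [PySem.Dict.keys_foldl_modify_key P Prod.fst [] (fun _ p v => v ++ [p.2]) PySem.Dict.empty]
    rw [PySem.Dict.keys_empty, PySem.Set.update_nil_left]
  rw [PySem.Dict.items_eq_map_keys _ (by rw [hk]; exact PySem.Set.nodup_ofList _) [], hk]
  apply List.map_congr_left
  intro c _
  rw [PySem.Dict.getD_foldl_modify_append]
  rw [PySem.Dict.getD_empty]
  rfl

theorem pvItemsCnt (P : List (String × String)) :
    (P.foldl (fun d p => d.modify p.1 0 (· + 1)) PySem.Dict.empty).items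
      = (PySem.Set.ofList (P.map Prod.fst)).map
          (fun c => (c, ((List.count c (P.map Prod.fst) : Int)))) := by
  have h : P.foldl (fun d p => d.modify p.1 0 (· + 1)) PySem.Dict.empty
      = PySem.Dict.counter (P.map Prod.fst) := by
    rw [PySem.Dict.counter_eq_foldl, List.foldl_map]
  rw [h, PySem.Dict.items_counter]

theorem pvCompanies (P : List (String × String)) :
    P.foldl (fun (acc : List String) p => if acc.contains p.1 then acc else acc ++ [p.1]) []
      = PySem.Set.ofList (P.map Prod.fst) := by
  rw [show PySem.Set.ofList (P.map Prod.fst) = PySem.Set.update [] (P.map Prod.fst) from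
        (PySem.Set.update_nil_left _).symm,
      PySem.Set.update_map_eq_foldl_add]
  rfl

theorem pvMain (l : List String) : sorting_employees l = sorting_employees_alt l := by
  simp only [sorting_employees, sorting_employees_alt]
  rw [show (fun (acc : PySem.Dict String (List String) × PySem.Dict String Int) y =>
        let company := PySem.Str.slice y (some (PySem.Str.find y "@" + 1)) (some (PySem.Str.find y "."))
        let name := PySem.Str.slice y (some 0) (some (PySem.Str.find y "@"))
        if acc.1.contains company = false then
          (acc.1.insert company [name], acc.2.insert company 1)
        else
          (acc.1.modify company [] (fun l => l ++ [name]), acc.2.modify company 0 (· + 1))) = pvStepA from rfl]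
  rw [show (fun y => (PySem.Str.slice y (some (PySem.Str.find y "@" + 1)) (some (PySem.Str.find y ".")),
        PySem.Str.slice y (some 0) (some (PySem.Str.find y "@")))) = pvParse from rfl]
  rw [pvFoldA l PySem.Dict.empty PySem.Dict.empty rfl]
  rw [pvItemsApp, pvItemsCnt, pvCompanies]
  refine congrArg _ ?_
  simp only [List.map_map]
  apply List.map_congr_left
  intro c _
  simp [Function.comp_def, List.count_eq_countP, List.countP_map, ← List.countP_eq_length_filter]

-- ===== VERDICT (by name: the statement is the Claim_ definition above) =====
theorem sorting_employees_spec : Claim_equal_sorting_employees := by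
  intro l _ _
  exact pvMain l
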